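-- pv_equiv track=rewrite | github.com/RayHackett/enzymm | Jess_analysis/Jess_Dict_Eval_Functions.py | create_cath_dict
-- ===== SOURCE A (Python) =====
-- def create_cath_dict(d):
--     cath_match_dict = {}
--     full_match = 0
--     level_3_match = 0
--     level_2_match = 0
--     level_1_match = 0
--     no_match = 0
--     no_data = 0
--     total_matches = 0
--     for key, key_vals in d.items():
--         for sub_key, match_list in key_vals.items():
--             for match in match_list:
--                 full_hit = False
--                 l3_hit = False
--                 l2_hit = False
--                 l1_hit = False
--                 no_hit = False
--                 total_matches += 1
--                 if match.get('Template_CATH'):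
--                     for Template_CATH in match['Template_CATH']:
--                         if match.get('Query_CATH'): # is a list of EC numbers; evaluate each
--                             for cath in match['Query_CATH']:
--                                 if cath == Template_CATH:
--                                     full_hit = True
--                                 elif cath.split('.')[:3] == Template_CATH.split('.')[:3]:
--                                     l3_hit = True
--                                 elif cath.split('.')[:2] == Template_CATH.split('.')[:2]:
--                                     l2_hit = True
--                                 elif cath.split('.')[:1] == Template_CATH.split('.')[:1]:
--                                     l1_hit = True
--                                 elif cath.split('.')[:1] != Template_CATH.split('.')[:1]:
--                                     no_hit = True
--
--                 # for each of the Query_EC numbers only take the highest level of match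
--                 if full_hit:
--                     full_match += 1
--                 elif l3_hit:
--                     level_3_match += 1
--                 elif l2_hit:
--                     level_2_match += 1
--                 elif l1_hit:
--                     level_1_match += 1
--                 elif no_hit:
--                     no_match += 1
--                 else:
--                     no_data += 1
--
--     cath_match_dict['4'] = full_match
--     cath_match_dict['3'] = level_3_match
--     cath_match_dict['2'] = level_2_match
--     cath_match_dict['1'] = level_1_match
--     cath_match_dict['no'] = no_match
--     cath_match_dict['NaN'] = no_data
--
--     return cath_match_dict
-- ===== SOURCE B (Python) =====
-- def _label(m):
--     ts = m.get('Template_CATH')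
--     qs = m.get('Query_CATH')
--     if not ts or not qs:
--         return 'NaN'
--     # hash-set index over the query side: one set per prefix depth, so each
--     # template is judged by four membership tests instead of a scan over qs
--     q4 = set(qs)
--     q3 = {tuple(q.split('.')[:3]) for q in qs}
--     q2 = {tuple(q.split('.')[:2]) for q in qs}
--     q1 = {tuple(q.split('.')[:1]) for q in qs}
--     best = 0
--     for t in ts:
--         if t in q4:
--             return '4'
--         p = t.split('.')
--         if tuple(p[:3]) in q3:
--             best = max(best, 3)
--         elif tuple(p[:2]) in q2:
--             best = max(best, 2)
--         elif tuple(p[:1]) in q1: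
--             best = max(best, 1)
--     return str(best) if best else 'no'
--
--
-- def create_cath_dict(d):
--     counts = {'4': 0, '3': 0, '2': 0, '1': 0, 'no': 0, 'NaN': 0}
--     for key_vals in d.values():
--         for match_list in key_vals.values():
--             for m in match_list:
--                 counts[_label(m)] += 1
--     return counts
-- ===== Notes on version B (the rewrite author's own statement) =====
-- stated objective: alternative
-- what changed: Per match, B builds four hash sets of query-CATH prefixes (full id and the 1/2/3-component prefixes) once and judges each template by four membership tests with an early return on a full match, instead of A's inner scan over all query ids per template with five hit booleans reduced by an elif chain; counting is a dict tally keyed by the label instead of seven running integer counters.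
import Mathlib
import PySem

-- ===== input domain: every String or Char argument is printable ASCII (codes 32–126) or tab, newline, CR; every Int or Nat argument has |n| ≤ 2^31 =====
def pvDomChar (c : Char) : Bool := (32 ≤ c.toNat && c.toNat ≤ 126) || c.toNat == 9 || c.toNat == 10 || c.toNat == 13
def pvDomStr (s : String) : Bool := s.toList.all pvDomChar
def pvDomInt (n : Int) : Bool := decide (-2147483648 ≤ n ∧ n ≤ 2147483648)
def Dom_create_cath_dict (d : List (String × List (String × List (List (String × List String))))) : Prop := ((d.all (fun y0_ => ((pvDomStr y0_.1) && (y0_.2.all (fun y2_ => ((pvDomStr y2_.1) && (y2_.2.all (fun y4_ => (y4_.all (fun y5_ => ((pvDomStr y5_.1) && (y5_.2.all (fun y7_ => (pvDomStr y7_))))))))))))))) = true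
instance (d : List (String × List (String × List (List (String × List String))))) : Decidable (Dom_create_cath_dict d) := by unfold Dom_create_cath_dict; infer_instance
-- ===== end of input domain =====

-- B indexes the query CATH ids per match in four prefix sets and judges each template by
-- membership tests (early return on a full match), tallying labels in a dict; objective: alternative.


-- ===== PORT A =====

-- cath.split('.')  (the separator "." is non-empty, so Str.split? is always `some`; getD [] is exact)
def pvSplitDot (s : String) : List String := (PySem.Str.split? s ".").getD []

-- the body of A's innermost loop: update the five hit booleans for one (Template_CATH, cath) pair
-- (Python's l[:k] for the literal nonnegative k is List.take k — exact)
def pvPairA (tc cath : String) (s : Bool × Bool × Bool × Bool × Bool) : Bool × Bool × Bool × Bool × Bool :=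
  if cath == tc then (true, s.2.1, s.2.2.1, s.2.2.2.1, s.2.2.2.2)
  else if (pvSplitDot cath).take 3 == (pvSplitDot tc).take 3 then (s.1, true, s.2.2.1, s.2.2.2.1, s.2.2.2.2)
  else if (pvSplitDot cath).take 2 == (pvSplitDot tc).take 2 then (s.1, s.2.1, true, s.2.2.2.1, s.2.2.2.2)
  else if (pvSplitDot cath).take 1 == (pvSplitDot tc).take 1 then (s.1, s.2.1, s.2.2.1, true, s.2.2.2.2)
  else if (pvSplitDot cath).take 1 != (pvSplitDot tc).take 1 then (s.1, s.2.1, s.2.2.1, s.2.2.2.1, true)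
  else s

-- per match: the five booleans after A's two nested loops ('if match.get(K)' = key present and list non-empty)
def pvMatchA (m : List (String × List String)) : Bool × Bool × Bool × Bool × Bool :=
  match (PySem.Dict.mk m).get? "Template_CATH" with
  | none => (false, false, false, false, false)
  | some tl =>
    if tl.isEmpty then (false, false, false, false, false)
    else
      tl.foldl (fun s tc =>
        match (PySem.Dict.mk m).get? "Query_CATH" with
        | none => s
        | some ql =>
          if ql.isEmpty then s
          else ql.foldl (fun s cath => pvPairA tc cath s) s) (false, false, false, false, false)

-- A's per-match counter update: total_matches += 1, then the elif chain
def pvBumpA (h : Bool × Bool × Bool × Bool × Bool) (c : Int × Int × Int × Int × Int × Int × Int) :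
    Int × Int × Int × Int × Int × Int × Int :=
  let (fm, m3, m2, m1, nm, nd, tot) := c
  let tot := tot + 1
  if h.1 then (fm + 1, m3, m2, m1, nm, nd, tot)
  else if h.2.1 then (fm, m3 + 1, m2, m1, nm, nd, tot)
  else if h.2.2.1 then (fm, m3, m2 + 1, m1, nm, nd, tot)
  else if h.2.2.2.1 then (fm, m3, m2, m1 + 1, nm, nd, tot)
  else if h.2.2.2.2 then (fm, m3, m2, m1, nm + 1, nd, tot)
  else (fm, m3, m2, m1, nm, nd + 1, tot)

def create_cath_dict (d : List (String × List (String × List (List (String × List String))))) : List (String × Int) :=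
  let c := d.foldl (fun c kv =>
    kv.2.foldl (fun c sk =>
      sk.2.foldl (fun c m => pvBumpA (pvMatchA m) c) c) c) (0, 0, 0, 0, 0, 0, 0)
  ((((((PySem.Dict.empty.insert "4" c.1).insert "3" c.2.1).insert "2" c.2.2.1).insert
      "1" c.2.2.2.1).insert "no" c.2.2.2.2.1).insert "NaN" c.2.2.2.2.2.1).items

-- ===== PORT B =====

-- B's template loop: four membership tests per template, early return '4' on a full match;
-- after the loop, 'str(best) if best else "no"' (best is one of 0,1,2,3 there)
def pvScanB (q4 : PySem.Set String) (q3 q2 q1 : PySem.Set (List String)) :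
    List String → Int → String
  | [], best => if best != 0 then PySem.Int.toStr best else "no"
  | t :: rest, best =>
    if PySem.Set.contains q4 t then "4"
    else
      let p := pvSplitDot t
      let best :=
        if PySem.Set.contains q3 (p.take 3) then max best 3
        else if PySem.Set.contains q2 (p.take 2) then max best 2
        else if PySem.Set.contains q1 (p.take 1) then max best 1
        else best
      pvScanB q4 q3 q2 q1 rest best

-- _label(m); Python's tuple(q.split('.')[:k]) set elements are ported as List String
def pvLabelB (m : List (String × List String)) : String :=
  match (PySem.Dict.mk m).get? "Template_CATH", (PySem.Dict.mk m).get? "Query_CATH" with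
  | some ts, some qs =>
    if ts.isEmpty || qs.isEmpty then "NaN"
    else
      pvScanB (PySem.Set.ofList qs)
        (PySem.Set.ofList (qs.map fun q => (pvSplitDot q).take 3))
        (PySem.Set.ofList (qs.map fun q => (pvSplitDot q).take 2))
        (PySem.Set.ofList (qs.map fun q => (pvSplitDot q).take 1))
        ts 0
  | _, _ => "NaN"

-- counts[label] += 1: the six keys are pre-seeded, so Python's d[k] = d[k] + 1 is getD + insert here
def create_cath_dict_alt (d : List (String × List (String × List (List (String × List String))))) : List (String × Int) :=
  let counts : PySem.Dict String Int :=
    PySem.Dict.ofList [("4", 0), ("3", 0), ("2", 0), ("1", 0), ("no", 0), ("NaN", 0)]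
  (d.foldl (fun c kv =>
    kv.2.foldl (fun c sk =>
      sk.2.foldl (fun c m => c.insert (pvLabelB m) (c.getD (pvLabelB m) 0 + 1)) c) c) counts).items

-- ===== PRECONDITION & SPEC =====
def Spec_create_cath_dict (d : List (String × List (String × List (List (String × List String))))) (out : List (String × Int)) : Prop := out = create_cath_dict_alt d
instance (d : List (String × List (String × List (List (String × List String))))) (out : List (String × Int)) : Decidable (Spec_create_cath_dict d out) := by unfold Spec_create_cath_dict; infer_instance

-- ===== CLAIM (what is proved, stated in full; the proofs are below) =====
def Claim_equal_create_cath_dict : Prop := ∀ (d : List (String × List (String × List (List (String × List String))))), Dom_create_cath_dict d → Spec_create_cath_dict d (create_cath_dict d)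

-- ===== LEMMAS AND PROOFS =====

-- the level of one (query, template) pair under A's elif cascade
def pvTier (q t : String) : Int :=
  if q == t then 4
  else if (pvSplitDot q).take 3 == (pvSplitDot t).take 3 then 3
  else if (pvSplitDot q).take 2 == (pvSplitDot t).take 2 then 2
  else if (pvSplitDot q).take 1 == (pvSplitDot t).take 1 then 1
  else 0

-- the level B's membership chain assigns to template t against the four query sets
def pvTierSet (q4 : PySem.Set String) (q3 q2 q1 : PySem.Set (List String)) (t : String) : Int :=
  if PySem.Set.contains q4 t then 4
  else if PySem.Set.contains q3 ((pvSplitDot t).take 3) then 3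
  else if PySem.Set.contains q2 ((pvSplitDot t).take 2) then 2
  else if PySem.Set.contains q1 ((pvSplitDot t).take 1) then 1
  else 0

-- the highest hit level recorded in A's five booleans (-1 = none set)
def pvG (s : Bool × Bool × Bool × Bool × Bool) : Int :=
  if s.1 then 4 else if s.2.1 then 3 else if s.2.2.1 then 2 else if s.2.2.2.1 then 1
  else if s.2.2.2.2 then 0 else -1

-- score -> output label
def pvLab (s : Int) : String :=
  if s = 4 then "4" else if s = 3 then "3" else if s = 2 then "2" else if s = 1 then "1"
  else if s = 0 then "no" else "NaN"

theorem pvTier_nonneg (q t : String) : 0 ≤ pvTier q t ∧ pvTier q t ≤ 4 := by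
  unfold pvTier; split_ifs <;> omega

theorem pvPairA_g (tc cath : String) (s : Bool × Bool × Bool × Bool × Bool) :
    pvG (pvPairA tc cath s) = max (pvTier cath tc) (pvG s) := by
  obtain ⟨a, b, c, e, f⟩ := s
  simp only [pvPairA, pvTier]
  split_ifs with h1 h2 h3 h4 h5 <;>
    try (cases a <;> cases b <;> cases c <;> cases e <;> cases f <;> decide)
  simp only [bne_eq_false_iff_eq, Bool.not_eq_true] at h5
  simp [h5] at h4

theorem pvInner_g (ql : List String) (tc : String) (s : Bool × Bool × Bool × Bool × Bool) :
    pvG (ql.foldl (fun s cath => pvPairA tc cath s) s)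
      = ql.foldl (fun best q => max best (pvTier q tc)) (pvG s) := by
  induction ql generalizing s with
  | nil => rfl
  | cons q ql ih =>
    simp only [List.foldl_cons]
    rw [ih, pvPairA_g]
    congr 1
    omega

-- fold of max when every new value is below the accumulator
theorem pvFoldl_max_of_le {α : Type} (f : α → Int) (l : List α) (c : Int)
    (h : ∀ x ∈ l, f x ≤ c) : l.foldl (fun b x => max b (f x)) c = c := by
  induction l with
  | nil => rfl
  | cons x l ih =>
    simp only [List.foldl_cons]
    rw [max_eq_left (h x (by simp))]
    exact ih fun y hy => h y (by simp [hy])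

-- fold of max over a non-empty list whose maximum value is M
theorem pvFoldl_max_char {α : Type} (f : α → Int) (M : Int) :
    ∀ (l : List α) (b0 : Int), l ≠ [] → (∀ x ∈ l, f x ≤ M) → (∃ x ∈ l, f x = M) →
      l.foldl (fun b x => max b (f x)) b0 = max b0 M := by
  intro l
  induction l with
  | nil => intro b0 h; exact absurd rfl h
  | cons x l ih =>
    intro b0 _ hub hex
    simp only [List.foldl_cons]
    by_cases hl : ∃ y ∈ l, f y = M
    · have hlne : l ≠ [] := by rcases hl with ⟨y, hy, _⟩; exact List.ne_nil_of_mem hy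
      rw [ih (max b0 (f x)) hlne (fun y hy => hub y (by simp [hy])) hl]
      have := hub x (by simp)
      omega
    · have hfx : f x = M := by
        rcases hex with ⟨y, hy, hfy⟩
        rcases List.mem_cons.mp hy with h | h
        · exact h ▸ hfy
        · exact absurd ⟨y, h, hfy⟩ hl
      rw [hfx, pvFoldl_max_of_le f l (max b0 M) (fun y hy => by
        have := hub y (by simp [hy])
        omega)]

theorem pvTierSet_range (q4 : PySem.Set String) (q3 q2 q1 : PySem.Set (List String)) (t : String) :
    0 ≤ pvTierSet q4 q3 q2 q1 t ∧ pvTierSet q4 q3 q2 q1 t ≤ 4 := by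
  unfold pvTierSet; split_ifs <;> omega

-- against the four sets built from qs, pvTierSet is the max pair level: upper bound and attainment
-- membership in a prefix set, spelled out
theorem pvMem_prefix_set (qs : List String) (k : Nat) (key : List String) :
    PySem.Set.contains (PySem.Set.ofList (qs.map fun q => (pvSplitDot q).take k)) key = true
      ↔ ∃ q ∈ qs, (pvSplitDot q).take k = key := by
  rw [PySem.Set.contains_iff, PySem.Set.mem_ofList, List.mem_map]

theorem pvMem_full_set (qs : List String) (t : String) :
    PySem.Set.contains (PySem.Set.ofList qs) t = true ↔ t ∈ qs := by
  rw [PySem.Set.contains_iff, PySem.Set.mem_ofList]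

theorem pvTierSet_ub (qs : List String) (t : String) :
    ∀ q ∈ qs, pvTier q t ≤ pvTierSet (PySem.Set.ofList qs)
      (PySem.Set.ofList (qs.map fun q => (pvSplitDot q).take 3))
      (PySem.Set.ofList (qs.map fun q => (pvSplitDot q).take 2))
      (PySem.Set.ofList (qs.map fun q => (pvSplitDot q).take 1)) t := by
  intro q hq
  unfold pvTierSet
  split_ifs with h4 h3 h2 h1
  · exact (pvTier_nonneg q t).2
  · -- t not in qs: q ≠ t, so pvTier q t ≤ 3
    unfold pvTier
    have hqt : ¬ (q == t) = true := fun h => (by rw [pvMem_full_set] at h4; exact h4 (beq_iff_eq.mp h ▸ hq))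
    split_ifs <;> omega
  · -- additionally no query shares the 3-prefix
    unfold pvTier
    have hqt : ¬ (q == t) = true := fun h => (by rw [pvMem_full_set] at h4; exact h4 (beq_iff_eq.mp h ▸ hq))
    have h3' : ¬ ((pvSplitDot q).take 3 == (pvSplitDot t).take 3) = true := fun h =>
      h3 ((pvMem_prefix_set qs 3 _).mpr ⟨q, hq, beq_iff_eq.mp h⟩)
    split_ifs <;> omega
  · unfold pvTier
    have hqt : ¬ (q == t) = true := fun h => (by rw [pvMem_full_set] at h4; exact h4 (beq_iff_eq.mp h ▸ hq))
    have h3' : ¬ ((pvSplitDot q).take 3 == (pvSplitDot t).take 3) = true := fun h =>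
      h3 ((pvMem_prefix_set qs 3 _).mpr ⟨q, hq, beq_iff_eq.mp h⟩)
    have h2' : ¬ ((pvSplitDot q).take 2 == (pvSplitDot t).take 2) = true := fun h =>
      h2 ((pvMem_prefix_set qs 2 _).mpr ⟨q, hq, beq_iff_eq.mp h⟩)
    split_ifs <;> omega
  · unfold pvTier
    have hqt : ¬ (q == t) = true := fun h => (by rw [pvMem_full_set] at h4; exact h4 (beq_iff_eq.mp h ▸ hq))
    have h3' : ¬ ((pvSplitDot q).take 3 == (pvSplitDot t).take 3) = true := fun h =>
      h3 ((pvMem_prefix_set qs 3 _).mpr ⟨q, hq, beq_iff_eq.mp h⟩)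
    have h2' : ¬ ((pvSplitDot q).take 2 == (pvSplitDot t).take 2) = true := fun h =>
      h2 ((pvMem_prefix_set qs 2 _).mpr ⟨q, hq, beq_iff_eq.mp h⟩)
    have h1' : ¬ ((pvSplitDot q).take 1 == (pvSplitDot t).take 1) = true := fun h =>
      h1 ((pvMem_prefix_set qs 1 _).mpr ⟨q, hq, beq_iff_eq.mp h⟩)
    split_ifs; omega

theorem pvTierSet_ex (qs : List String) (t : String) (hne : qs ≠ []) :
    ∃ q ∈ qs, pvTier q t = pvTierSet (PySem.Set.ofList qs)
      (PySem.Set.ofList (qs.map fun q => (pvSplitDot q).take 3))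
      (PySem.Set.ofList (qs.map fun q => (pvSplitDot q).take 2))
      (PySem.Set.ofList (qs.map fun q => (pvSplitDot q).take 1)) t := by
  unfold pvTierSet
  split_ifs with h4 h3 h2 h1
  · exact ⟨t, (pvMem_full_set qs t).mp h4, by simp [pvTier]⟩
  · obtain ⟨q, hq, hk⟩ := (pvMem_prefix_set qs 3 _).mp h3
    refine ⟨q, hq, ?_⟩
    have hqt : ¬ (q == t) = true := fun h => (by rw [pvMem_full_set] at h4; exact h4 (beq_iff_eq.mp h ▸ hq))
    simp [pvTier, hqt, hk]
  · obtain ⟨q, hq, hk⟩ := (pvMem_prefix_set qs 2 _).mp h2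
    refine ⟨q, hq, ?_⟩
    have hqt : ¬ (q == t) = true := fun h => (by rw [pvMem_full_set] at h4; exact h4 (beq_iff_eq.mp h ▸ hq))
    have h3' : ¬ ((pvSplitDot q).take 3 == (pvSplitDot t).take 3) = true := fun h =>
      h3 ((pvMem_prefix_set qs 3 _).mpr ⟨q, hq, beq_iff_eq.mp h⟩)
    simp [pvTier, hqt, h3', hk]
  · obtain ⟨q, hq, hk⟩ := (pvMem_prefix_set qs 1 _).mp h1
    refine ⟨q, hq, ?_⟩
    have hqt : ¬ (q == t) = true := fun h => (by rw [pvMem_full_set] at h4; exact h4 (beq_iff_eq.mp h ▸ hq))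
    have h3' : ¬ ((pvSplitDot q).take 3 == (pvSplitDot t).take 3) = true := fun h =>
      h3 ((pvMem_prefix_set qs 3 _).mpr ⟨q, hq, beq_iff_eq.mp h⟩)
    have h2' : ¬ ((pvSplitDot q).take 2 == (pvSplitDot t).take 2) = true := fun h =>
      h2 ((pvMem_prefix_set qs 2 _).mpr ⟨q, hq, beq_iff_eq.mp h⟩)
    simp [pvTier, hqt, h3', h2', hk]
  · obtain ⟨q, hq⟩ := List.exists_mem_of_ne_nil qs hne
    refine ⟨q, hq, ?_⟩
    have hqt : ¬ (q == t) = true := fun h => (by rw [pvMem_full_set] at h4; exact h4 (beq_iff_eq.mp h ▸ hq))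
    have h3' : ¬ ((pvSplitDot q).take 3 == (pvSplitDot t).take 3) = true := fun h =>
      h3 ((pvMem_prefix_set qs 3 _).mpr ⟨q, hq, beq_iff_eq.mp h⟩)
    have h2' : ¬ ((pvSplitDot q).take 2 == (pvSplitDot t).take 2) = true := fun h =>
      h2 ((pvMem_prefix_set qs 2 _).mpr ⟨q, hq, beq_iff_eq.mp h⟩)
    have h1' : ¬ ((pvSplitDot q).take 1 == (pvSplitDot t).take 1) = true := fun h =>
      h1 ((pvMem_prefix_set qs 1 _).mpr ⟨q, hq, beq_iff_eq.mp h⟩)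
    simp [pvTier, hqt, h3', h2', h1']

-- B's scan = label of the fold of max tier-set levels
theorem pvScanB_eq (q4 : PySem.Set String) (q3 q2 q1 : PySem.Set (List String)) :
    ∀ (ts : List String) (best : Int), 0 ≤ best → best ≤ 3 →
      pvScanB q4 q3 q2 q1 ts best
        = pvLab (ts.foldl (fun b t => max b (pvTierSet q4 q3 q2 q1 t)) best) := by
  intro ts
  induction ts with
  | nil =>
    intro best h0 h3
    have hb : best = 0 ∨ best = 1 ∨ best = 2 ∨ best = 3 := by omega
    rcases hb with h|h|h|h <;> subst h <;> rfl
  | cons t rest ih =>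
    intro best h0 h3
    show (if PySem.Set.contains q4 t then "4" else _) = _
    simp only [List.foldl_cons]
    by_cases h4 : PySem.Set.contains q4 t = true
    · rw [if_pos h4]
      have hT : pvTierSet q4 q3 q2 q1 t = 4 := by unfold pvTierSet; rw [if_pos h4]
      rw [hT, max_eq_right (by omega),
        pvFoldl_max_of_le _ rest 4 (fun x _ => (pvTierSet_range q4 q3 q2 q1 x).2)]
      rfl
    · rw [if_neg h4]
      have hchain :
          (if PySem.Set.contains q3 ((pvSplitDot t).take 3) then max best 3
           else if PySem.Set.contains q2 ((pvSplitDot t).take 2) then max best 2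
           else if PySem.Set.contains q1 ((pvSplitDot t).take 1) then max best 1
           else best) = max best (pvTierSet q4 q3 q2 q1 t) := by
        unfold pvTierSet
        rw [if_neg h4]
        split_ifs <;> omega
      show pvScanB q4 q3 q2 q1 rest _ = _
      rw [hchain]
      have hr := pvTierSet_range q4 q3 q2 q1 t
      have hTle : pvTierSet q4 q3 q2 q1 t ≤ 3 := by
        unfold pvTierSet at *
        rw [if_neg h4] at *
        split_ifs at * <;> omega
      exact ih (max best (pvTierSet q4 q3 q2 q1 t)) (by omega) (by omega)

-- A's two nested loops, through pvG: fold of max pair tiers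
theorem pvOuter_g (qs : List String) : ∀ (ts : List String) (s : Bool × Bool × Bool × Bool × Bool),
    pvG (ts.foldl (fun s tc => qs.foldl (fun s cath => pvPairA tc cath s) s) s)
      = ts.foldl (fun b t => qs.foldl (fun b q => max b (pvTier q t)) b) (pvG s) := by
  intro ts
  induction ts with
  | nil => intro s; rfl
  | cons t rest ih =>
    intro s
    simp only [List.foldl_cons]
    rw [ih, pvInner_g]

-- per match: B's label is the label of A's best recorded level
theorem pvMatch_label (m : List (String × List String)) :
    pvLabelB m = pvLab (pvG (pvMatchA m)) := by
  unfold pvLabelB pvMatchA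
  cases hT : (PySem.Dict.mk m).get? "Template_CATH" with
  | none => rfl
  | some ts =>
    cases hQ : (PySem.Dict.mk m).get? "Query_CATH" with
    | none =>
      by_cases hte : ts.isEmpty
      · simp only [hte]; rfl
      · simp only [hte]
        rw [List.foldl_fixed']
        · rfl
        · intro tc; rfl
    | some qs =>
      by_cases hte : ts.isEmpty
      · simp only [hte]; rfl
      · by_cases hqe : qs.isEmpty
        · simp only [hte, hqe]
          rw [List.foldl_fixed']
          · rfl
          · intro tc; simp
        · simp only [hte, hqe]
          have hqne : qs ≠ [] := fun h => by subst h; simp at hqe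
          have htne : ts ≠ [] := fun h => by subst h; simp at hte
          -- reduce A's nested loops to a fold of max tier-set levels
          simp only [Bool.false_eq_true, if_false]
          rw [pvOuter_g]
          have hg0 : pvG (false, false, false, false, false) = -1 := rfl
          rw [hg0]
          have hinner : (fun (b : Int) (t : String) => qs.foldl (fun b q => max b (pvTier q t)) b)
              = fun b t => max b (pvTierSet (PySem.Set.ofList qs)
                  (PySem.Set.ofList (qs.map fun q => (pvSplitDot q).take 3))
                  (PySem.Set.ofList (qs.map fun q => (pvSplitDot q).take 2))
                  (PySem.Set.ofList (qs.map fun q => (pvSplitDot q).take 1)) t) := by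
            funext b t
            exact pvFoldl_max_char _ _ qs b hqne (pvTierSet_ub qs t) (pvTierSet_ex qs t hqne)
          rw [hinner, pvScanB_eq _ _ _ _ ts 0 le_rfl (by omega)]
          -- the two folds differ only in their start (-1 vs 0); the first step erases it
          obtain ⟨t0, ts', rfl⟩ := List.exists_cons_of_ne_nil htne
          simp only [List.foldl_cons]
          have hr := pvTierSet_range (PySem.Set.ofList qs)
            (PySem.Set.ofList (qs.map fun q => (pvSplitDot q).take 3))
            (PySem.Set.ofList (qs.map fun q => (pvSplitDot q).take 2))
            (PySem.Set.ofList (qs.map fun q => (pvSplitDot q).take 1)) t0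
          rw [max_eq_right hr.1, max_eq_right (by omega : (-1 : Int) ≤ _)]
          simp

-- A's per-match counter bump, expressed through the best level
def pvStep (c : Int × Int × Int × Int × Int × Int × Int) (b : Int) : Int × Int × Int × Int × Int × Int × Int :=
  (c.1 + (if b = 4 then 1 else 0), c.2.1 + (if b = 3 then 1 else 0), c.2.2.1 + (if b = 2 then 1 else 0),
   c.2.2.2.1 + (if b = 1 then 1 else 0), c.2.2.2.2.1 + (if b = 0 then 1 else 0),
   c.2.2.2.2.2.1 + (if b = -1 then 1 else 0), c.2.2.2.2.2.2 + 1)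

theorem pvBumpA_step (h : Bool × Bool × Bool × Bool × Bool) (c : Int × Int × Int × Int × Int × Int × Int) :
    pvBumpA h c = pvStep c (pvG h) := by
  obtain ⟨fm, m3, m2, m1, nm, nd, tot⟩ := c
  obtain ⟨a, b, c, e, f⟩ := h
  cases a <;> cases b <;> cases c <;> cases e <;> cases f <;> simp [pvBumpA, pvStep, pvG]

theorem pvStep_foldl (l : List Int) (c : Int × Int × Int × Int × Int × Int × Int) :
    l.foldl pvStep c
      = (c.1 + (l.count 4 : Int), c.2.1 + (l.count 3 : Int), c.2.2.1 + (l.count 2 : Int),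
         c.2.2.2.1 + (l.count 1 : Int), c.2.2.2.2.1 + (l.count 0 : Int),
         c.2.2.2.2.2.1 + (l.count (-1) : Int), c.2.2.2.2.2.2 + (l.length : Int)) := by
  induction l generalizing c with
  | nil => simp
  | cons x l ih =>
    obtain ⟨fm, m3, m2, m1, nm, nd, tot⟩ := c
    simp only [List.foldl_cons, ih, List.count_cons, List.length_cons, pvStep]
    refine Prod.ext ?_ (Prod.ext ?_ (Prod.ext ?_ (Prod.ext ?_ (Prod.ext ?_ (Prod.ext ?_ ?_))))) <;>
      simp [beq_iff_eq] <;> (try split_ifs) <;> omega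

theorem pvFoldl_flatMap {α β γ : Type} (g : α → List β) (f : γ → β → γ) (l : List α) (c : γ) :
    (l.flatMap g).foldl f c = l.foldl (fun c x => (g x).foldl f c) c := by
  induction l generalizing c with
  | nil => rfl
  | cons x l ih => simp [List.flatMap_cons, List.foldl_append, ih]

-- the six-key counts dict as a shape, and one increment step per key (definitional)
def pvMk6 (a b c e f g : Int) : PySem.Dict String Int :=
  PySem.Dict.ofList [("4", a), ("3", b), ("2", c), ("1", e), ("no", f), ("NaN", g)]

theorem pvStep4 (a b c e f g : Int) :
    (pvMk6 a b c e f g).insert "4" ((pvMk6 a b c e f g).getD "4" 0 + 1) = pvMk6 (a+1) b c e f g := rfl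
theorem pvStep3 (a b c e f g : Int) :
    (pvMk6 a b c e f g).insert "3" ((pvMk6 a b c e f g).getD "3" 0 + 1) = pvMk6 a (b+1) c e f g := rfl
theorem pvStep2 (a b c e f g : Int) :
    (pvMk6 a b c e f g).insert "2" ((pvMk6 a b c e f g).getD "2" 0 + 1) = pvMk6 a b (c+1) e f g := rfl
theorem pvStep1 (a b c e f g : Int) :
    (pvMk6 a b c e f g).insert "1" ((pvMk6 a b c e f g).getD "1" 0 + 1) = pvMk6 a b c (e+1) f g := rfl
theorem pvStepNo (a b c e f g : Int) :
    (pvMk6 a b c e f g).insert "no" ((pvMk6 a b c e f g).getD "no" 0 + 1) = pvMk6 a b c e (f+1) g := rfl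
theorem pvStepNaN (a b c e f g : Int) :
    (pvMk6 a b c e f g).insert "NaN" ((pvMk6 a b c e f g).getD "NaN" 0 + 1) = pvMk6 a b c e f (g+1) := rfl

theorem pvTally_mk6 (L : List String)
    (hL : ∀ x ∈ L, x = "4" ∨ x = "3" ∨ x = "2" ∨ x = "1" ∨ x = "no" ∨ x = "NaN") :
    ∀ a b c e f g : Int,
      L.foldl (fun d x => d.insert x (d.getD x 0 + 1)) (pvMk6 a b c e f g)
        = pvMk6 (a + L.count "4") (b + L.count "3") (c + L.count "2") (e + L.count "1")
            (f + L.count "no") (g + L.count "NaN") := by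
  induction L with
  | nil => intro a b c e f g; simp
  | cons x L ih =>
    intro a b c e f g
    have hx := hL x (by simp)
    have ih' := ih (fun y hy => hL y (by simp [hy]))
    simp only [List.foldl_cons, List.count_cons]
    rcases hx with h|h|h|h|h|h <;> subst h
    · rw [pvStep4, ih']; congr 1; all_goals simp [add_comm, add_left_comm]
    · rw [pvStep3, ih']; congr 1; all_goals simp [add_comm, add_left_comm]
    · rw [pvStep2, ih']; congr 1; all_goals simp [add_comm, add_left_comm]
    · rw [pvStep1, ih']; congr 1; all_goals simp [add_comm, add_left_comm]
    · rw [pvStepNo, ih']; congr 1; all_goals simp [add_comm, add_left_comm]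
    · rw [pvStepNaN, ih']; congr 1; all_goals simp [add_comm, add_left_comm]

-- pvG takes one of six values
theorem pvG_range (h : Bool × Bool × Bool × Bool × Bool) : -1 ≤ pvG h ∧ pvG h ≤ 4 := by
  unfold pvG; split_ifs <;> omega

theorem pvCount_map_lab (S : List Int) (hS : ∀ s ∈ S, -1 ≤ s ∧ s ≤ 4) (v : Int)
    (hv : -1 ≤ v ∧ v ≤ 4) : (S.map pvLab).count (pvLab v) = S.count v := by
  induction S with
  | nil => rfl
  | cons s S ih =>
    have hs := hS s (by simp)
    have hrec := ih fun x hx => hS x (by simp [hx])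
    simp only [List.map_cons, List.count_cons, hrec]
    congr 1
    have h1 : s = -1 ∨ s = 0 ∨ s = 1 ∨ s = 2 ∨ s = 3 ∨ s = 4 := by omega
    have h2 : v = -1 ∨ v = 0 ∨ v = 1 ∨ v = 2 ∨ v = 3 ∨ v = 4 := by omega
    rcases h1 with h1|h1|h1|h1|h1|h1 <;> rcases h2 with h2|h2|h2|h2|h2|h2 <;> subst h1 <;> subst h2 <;> decide

theorem pvItems_chain (a b c e f g : Int) :
    ((((((PySem.Dict.empty.insert "4" a).insert "3" b).insert "2" c).insert
        "1" e).insert "no" f).insert "NaN" g).items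
      = [("4", a), ("3", b), ("2", c), ("1", e), ("no", f), ("NaN", g)] := rfl

-- ===== VERDICT (by name: the statement is the Claim_ definition above) =====
theorem pvItems_mk6 (a b c e f g : Int) :
    (pvMk6 a b c e f g).items = [("4", a), ("3", b), ("2", c), ("1", e), ("no", f), ("NaN", g)] := rfl

theorem pvLab_mem (s : Int) :
    pvLab s = "4" ∨ pvLab s = "3" ∨ pvLab s = "2" ∨ pvLab s = "1" ∨ pvLab s = "no" ∨ pvLab s = "NaN" := by
  unfold pvLab; split_ifs <;> simp

theorem create_cath_dict_spec : Claim_equal_create_cath_dict := by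
  intro d _
  show create_cath_dict d = create_cath_dict_alt d
  unfold create_cath_dict create_cath_dict_alt
  have hbA : (fun (c : Int × Int × Int × Int × Int × Int × Int) (m : List (String × List String)) =>
      pvBumpA (pvMatchA m) c) = fun c m => pvStep c (pvG (pvMatchA m)) :=
    funext fun c => funext fun m => pvBumpA_step (pvMatchA m) c
  have hbB : (fun (c : PySem.Dict String Int) (m : List (String × List String)) =>
      c.insert (pvLabelB m) (c.getD (pvLabelB m) 0 + 1))
      = fun c m => c.insert (pvLab (pvG (pvMatchA m))) (c.getD (pvLab (pvG (pvMatchA m))) 0 + 1) :=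
    funext fun c => funext fun m => by rw [pvMatch_label]
  simp only [hbA, hbB]
  -- both triple folds as flat folds over the per-match score list S
  set S : List Int := d.flatMap (fun kv => kv.2.flatMap fun sk => sk.2.map fun m => pvG (pvMatchA m)) with hS
  have hA : d.foldl (fun c kv => kv.2.foldl (fun c sk =>
        sk.2.foldl (fun c m => pvStep c (pvG (pvMatchA m))) c) c) (0, 0, 0, 0, 0, 0, 0)
      = S.foldl pvStep (0, 0, 0, 0, 0, 0, 0) := by
    rw [hS]; simp only [pvFoldl_flatMap, List.foldl_map]
  have hB : d.foldl (fun c kv => kv.2.foldl (fun c sk =>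
        sk.2.foldl (fun c m => c.insert (pvLab (pvG (pvMatchA m)))
          (c.getD (pvLab (pvG (pvMatchA m))) 0 + 1)) c) c)
        (PySem.Dict.ofList [("4", 0), ("3", 0), ("2", 0), ("1", 0), ("no", 0), ("NaN", 0)])
      = (S.map pvLab).foldl (fun c x => c.insert x (c.getD x 0 + 1)) (pvMk6 0 0 0 0 0 0) := by
    rw [hS]; simp only [pvFoldl_flatMap, List.foldl_map, List.map_flatMap, List.map_map]
    rfl
  rw [hA, hB, pvStep_foldl, pvTally_mk6 (S.map pvLab)
    (fun x hx => by
      obtain ⟨sv, _, rfl⟩ := List.mem_map.mp hx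
      exact pvLab_mem sv)]
  have hrange : ∀ sv ∈ S, -1 ≤ sv ∧ sv ≤ 4 := by
    intro sv hsv
    rw [hS] at hsv
    obtain ⟨kv, _, h1⟩ := List.mem_flatMap.mp hsv
    obtain ⟨sk, _, h2⟩ := List.mem_flatMap.mp h1
    obtain ⟨m, _, rfl⟩ := List.mem_map.mp h2
    exact pvG_range (pvMatchA m)
  have c4 := pvCount_map_lab S hrange 4 (by omega)
  have c3 := pvCount_map_lab S hrange 3 (by omega)
  have c2 := pvCount_map_lab S hrange 2 (by omega)
  have c1 := pvCount_map_lab S hrange 1 (by omega)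
  have c0 := pvCount_map_lab S hrange 0 (by omega)
  have cn := pvCount_map_lab S hrange (-1) (by omega)
  have e4 : pvLab 4 = "4" := rfl
  have e3 : pvLab 3 = "3" := rfl
  have e2 : pvLab 2 = "2" := rfl
  have e1 : pvLab 1 = "1" := rfl
  have e0 : pvLab 0 = "no" := rfl
  have en : pvLab (-1) = "NaN" := rfl
  rw [e4] at c4; rw [e3] at c3; rw [e2] at c2; rw [e1] at c1; rw [e0] at c0; rw [en] at cn
  rw [pvItems_chain, pvItems_mk6, c4, c3, c2, c1, c0, cn]
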